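-- pv_equiv track=rewrite | github.com/sumitparw/leetcode_practise | array/target_sum.py | targetsum_sort
-- ===== SOURCE A (Python) =====
-- def targetsum_sort(arr,k):
--     arr =sorted(arr)
--     return_list = []
--     l = 0
--     r = len(arr)-1
--     while(l<r):
--         if arr[l]+arr[r] == k:
--             return_list.append((arr[l],arr[r]))
--             l +=1
--             r -=1
--         elif arr[l]+arr[r] >k:
--             r -=1
--         else:
--             l +=1
--
--     return return_list
-- ===== SOURCE B (Python) =====
-- def targetsum_sort(arr, k):
--     a = sorted(arr)
--     # group the sorted list into runs of equal adjacent elements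
--     runs = []
--     i = 0
--     n = len(a)
--     while i < n:
--         j = i
--         while j < n and a[j] == a[i]:
--             j += 1
--         runs.append((a[i], j - i))
--         i = j
--     cnt = dict(runs)
--     out = []
--     for v, c in runs:
--         w = k - v
--         if v < w:
--             out += [(v, w)] * min(c, cnt.get(w, 0))
--         elif v == w:
--             out += [(v, v)] * (c // 2)
--     return out
-- ===== Notes on version B (the rewrite author's own statement) =====
-- stated objective: alternative
-- what changed: Replaces A's two-pointer scan over the sorted array with a run-length pass: the sorted list is grouped into runs of equal values with their counts, and for each distinct value v in ascending order B emits min(count[v], count[k-v]) pairs (v, k-v) when v < k-v and count[v]//2 pairs (v, v) when v == k-v, reproducing A's exact output list.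
import Mathlib
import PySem

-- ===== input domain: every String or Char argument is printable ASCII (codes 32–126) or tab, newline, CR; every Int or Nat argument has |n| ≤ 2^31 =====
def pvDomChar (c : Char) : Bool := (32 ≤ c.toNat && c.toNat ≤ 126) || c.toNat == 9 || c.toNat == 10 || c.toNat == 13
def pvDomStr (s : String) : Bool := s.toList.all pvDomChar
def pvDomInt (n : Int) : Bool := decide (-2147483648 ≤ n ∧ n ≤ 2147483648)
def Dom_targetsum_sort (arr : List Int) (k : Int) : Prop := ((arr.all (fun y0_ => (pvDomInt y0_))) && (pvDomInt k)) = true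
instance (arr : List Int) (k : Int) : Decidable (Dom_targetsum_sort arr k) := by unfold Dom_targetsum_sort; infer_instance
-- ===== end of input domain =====

-- B replaces A's two-pointer scan with a run-length (count) pass over the sorted list: alternative algorithm, same exact output.

-- ===== PORT A =====
-- the while loop: l, r indices into the sorted list
def pvALoop (a : List Int) (k : Int) (l r : Int) (acc : List (Int × Int)) : List (Int × Int) :=
  if l < r then
    let x := PySem.List.pyGetD a l 0   -- arr[l]; l is always in range while l < r
    let y := PySem.List.pyGetD a r 0   -- arr[r]
    if x + y = k then pvALoop a k (l + 1) (r - 1) (acc ++ [(x, y)])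
    else if x + y > k then pvALoop a k l (r - 1) acc
    else pvALoop a k (l + 1) r acc
  else acc
termination_by (r - l).toNat
decreasing_by all_goals omega

def targetsum_sort (arr : List Int) (k : Int) : List (Int × Int) :=
  let a := PySem.List.sorted arr (fun x => x) false
  pvALoop a k 0 ((a.length : Int) - 1) []

-- ===== PORT B =====
-- group the sorted list into runs of equal adjacent elements (the inner j-scan)
def pvRuns (a : List Int) : List (Int × Nat) :=
  match a with
  | [] => []
  | x :: xs =>
    (x, (xs.takeWhile (fun z => z == x)).length + 1) :: pvRuns (xs.dropWhile (fun z => z == x))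
termination_by a.length
decreasing_by
  simpa [Nat.lt_succ_iff] using List.Sublist.length_le (List.dropWhile_sublist _)

-- cnt.get(w, 0): first (= only, keys are distinct) run with key w
def pvCnt (rs : List (Int × Nat)) (w : Int) : Nat :=
  match rs.find? (fun p => p.1 == w) with
  | some p => p.2
  | none => 0

-- the body of B's emitting loop
def pvEmit (rs : List (Int × Nat)) (k : Int) (p : Int × Nat) : List (Int × Int) :=
  let w := k - p.1
  if p.1 < w then List.replicate (min p.2 (pvCnt rs w)) (p.1, w)
  else if p.1 = w then List.replicate (p.2 / 2) (p.1, p.1)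
  else []

def targetsum_sort_alt (arr : List Int) (k : Int) : List (Int × Int) :=
  let a := PySem.List.sorted arr (fun x => x) false
  let rs := pvRuns a
  rs.foldl (fun out p => out ++ pvEmit rs k p) []

-- ===== PRECONDITION & SPEC =====
def Spec_targetsum_sort (arr : List Int) (k : Int) (out : List (Int × Int)) : Prop := out = targetsum_sort_alt arr k
instance (arr : List Int) (k : Int) (out : List (Int × Int)) : Decidable (Spec_targetsum_sort arr k out) := by unfold Spec_targetsum_sort; infer_instance

-- ===== CLAIM (what is proved, stated in full; the proofs are below) =====
def Claim_equal_targetsum_sort : Prop := ∀ (arr : List Int) (k : Int), Dom_targetsum_sort arr k → Spec_targetsum_sort arr k (targetsum_sort arr k)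

-- ===== LEMMAS AND PROOFS =====

-- A's loop, abstracted to the sublist arr[l..r]: compare the two ends, shrink
def pvG (k : Int) (s : List Int) : List (Int × Int) :=
  match s with
  | [] => []
  | [_] => []
  | x :: b :: t =>
    let y := (b :: t).getLast (by simp)
    if x + y = k then (x, y) :: pvG k ((b :: t).dropLast)
    else if x + y > k then pvG k ((x :: b :: t).dropLast)
    else pvG k (b :: t)
termination_by s.length
decreasing_by all_goals simp [List.length_dropLast]

theorem pvG_step (k : Int) (s : List Int) (x y : Int) (hx : s[0]? = some x)
    (hy : s[s.length - 1]? = some y) (h2 : 2 ≤ s.length) :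
    pvG k s = if x + y = k then (x, y) :: pvG k s.tail.dropLast
              else if x + y > k then pvG k s.dropLast
              else pvG k s.tail := by
  match s with
  | x' :: b :: t =>
    have hx' : x' = x := by simpa using hx
    have hlast : (b :: t).getLast (by simp) = y := by
      have h1 : (x' :: b :: t).getLast? = some y := by
        rw [List.getLast?_eq_getElem?]; exact hy
      rw [List.getLast?_cons_cons, List.getLast?_eq_some_getLast (by simp)] at h1
      simpa using h1
    rw [pvG]
    simp only [hx', hlast, List.tail_cons, List.dropLast]

-- run list back to the list it encodes
def pvFlat (rs : List (Int × Nat)) : List Int := rs.flatMap (fun p => List.replicate p.2 p.1)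

-- a well-formed run list: strictly increasing keys, positive counts
def pvValid (rs : List (Int × Nat)) : Prop :=
  (rs.map Prod.fst).Pairwise (· < ·) ∧ ∀ p ∈ rs, 0 < p.2

-- B's emitting loop as a flatMap
def pvF (k : Int) (rs : List (Int × Nat)) : List (Int × Int) := rs.flatMap (pvEmit rs k)

theorem pvG_short (k : Int) (s : List Int) (h : s.length ≤ 1) : pvG k s = [] := by
  match s with
  | [] => simp [pvG]
  | [_] => simp [pvG]
  | _ :: _ :: _ => simp at h

theorem pvTakeWhile_eq_replicate (xs : List Int) (x : Int) :
    xs.takeWhile (fun z => z == x) = List.replicate (xs.takeWhile (fun z => z == x)).length x := by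
  apply List.eq_replicate_of_mem
  intro b hb
  simpa using List.mem_takeWhile_imp hb

theorem pvFlat_pvRuns (a : List Int) : pvFlat (pvRuns a) = a := by
  fun_induction pvRuns a with
  | case1 => rfl
  | case2 x xs ih =>
    simp only [pvFlat, List.flatMap_cons] at *
    rw [ih, List.replicate_succ]
    simp only [List.cons_append, List.cons.injEq, true_and]
    conv_rhs => rw [← List.takeWhile_append_dropWhile (p := fun z => z == x) (l := xs)]
    rw [← pvTakeWhile_eq_replicate]

theorem pvRuns_key_mem (a : List Int) : ∀ p ∈ pvRuns a, p.1 ∈ a ∧ 0 < p.2 := by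
  fun_induction pvRuns a with
  | case1 => simp
  | case2 x xs ih =>
    intro p hp
    rcases List.mem_cons.1 hp with h | h
    · subst h; simp
    · obtain ⟨h1, h2⟩ := ih p h
      exact ⟨List.mem_cons_of_mem _ ((List.dropWhile_sublist _).mem h1), h2⟩

theorem pvDropWhile_gt (xs : List Int) (x : Int) (hs : xs.Pairwise (· ≤ ·))
    (hge : ∀ z ∈ xs, x ≤ z) :
    ∀ z ∈ xs.dropWhile (fun w => w == x), x < z := by
  intro z hz
  obtain ⟨hd, tl, hcons⟩ := List.exists_cons_of_ne_nil (List.ne_nil_of_mem hz)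
  have hhead : (hd == x) = false := by
    have := List.head_dropWhile_not (fun w => w == x) (l := xs) (by simp [hcons])
    simpa [hcons] using this
  have hheadmem : hd ∈ xs := by
    have hm : hd ∈ xs.dropWhile (fun w => w == x) := by rw [hcons]; exact List.mem_cons_self
    exact (List.dropWhile_sublist _).mem hm
  have hne : hd ≠ x := by simpa using hhead
  have hxlt : x < hd := lt_of_le_of_ne (hge _ hheadmem) (Ne.symm hne)
  have hpw : (hd :: tl).Pairwise (· ≤ ·) :=
    hcons ▸ hs.sublist (List.dropWhile_sublist _)
  rcases List.mem_cons.1 (hcons ▸ hz) with h | h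
  · exact h ▸ hxlt
  · exact lt_of_lt_of_le hxlt (List.rel_of_pairwise_cons hpw h)

theorem pvValid_pvRuns (a : List Int) (h : a.Pairwise (· ≤ ·)) : pvValid (pvRuns a) := by
  fun_induction pvRuns a with
  | case1 => exact ⟨List.Pairwise.nil, by simp⟩
  | case2 x xs ih =>
    have hxs : xs.Pairwise (· ≤ ·) := h.tail
    have hge : ∀ z ∈ xs, x ≤ z := fun z hz => List.rel_of_pairwise_cons h hz
    have hdw : (xs.dropWhile (fun w => w == x)).Pairwise (· ≤ ·) :=
      hxs.sublist (List.dropWhile_sublist _)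
    obtain ⟨hk, hc⟩ := ih hdw
    refine ⟨?_, ?_⟩
    · simp only [List.map_cons]
      refine List.Pairwise.cons ?_ hk
      intro q hq
      obtain ⟨p, hp, rfl⟩ := List.mem_map.1 hq
      exact pvDropWhile_gt xs x hxs hge p.1 (pvRuns_key_mem _ p hp).1
    · intro p hp
      rcases List.mem_cons.1 hp with hh | hh
      · subst hh; simp
      · exact hc p hh

-- cons a run, dropping it when its count is zero
def pvNcons (p : Int × Nat) (rs : List (Int × Nat)) : List (Int × Nat) :=
  if p.2 = 0 then rs else p :: rs

-- snoc a run, dropping it when its count is zero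
def pvNsnoc (rs : List (Int × Nat)) (p : Int × Nat) : List (Int × Nat) :=
  if p.2 = 0 then rs else rs ++ [p]

-- pvEmit with the partner count abstracted out
def pvEmitC (k v : Int) (c cnt : Nat) : List (Int × Int) :=
  if v < k - v then List.replicate (min c cnt) (v, k - v)
  else if v = k - v then List.replicate (c / 2) (v, v)
  else []

theorem pvEmit_eq_pvEmitC (rs : List (Int × Nat)) (k : Int) (p : Int × Nat) :
    pvEmit rs k p = pvEmitC k p.1 p.2 (pvCnt rs (k - p.1)) := rfl

theorem pvEmitC_zero (k v : Int) (cnt : Nat) : pvEmitC k v 0 cnt = [] := by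
  unfold pvEmitC; split_ifs <;> simp

theorem pvEmitC_lt (k v : Int) (c cnt : Nat) (h : v + v < k) :
    pvEmitC k v c cnt = List.replicate (min c cnt) (v, k - v) := by
  unfold pvEmitC; rw [if_pos (show v < k - v by omega)]

theorem pvEmitC_eq2 (k v : Int) (c cnt : Nat) (h : v + v = k) :
    pvEmitC k v c cnt = List.replicate (c / 2) (v, v) := by
  unfold pvEmitC
  rw [if_neg (show ¬ v < k - v by omega), if_pos (show v = k - v by omega)]

theorem pvEmitC_gt (k v : Int) (c cnt : Nat) (h : k < v + v) :
    pvEmitC k v c cnt = [] := by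
  unfold pvEmitC
  rw [if_neg (show ¬ v < k - v by omega), if_neg (show ¬ v = k - v by omega)]

theorem pvFlat_nil : pvFlat [] = [] := rfl

theorem pvFlat_cons (p : Int × Nat) (rs : List (Int × Nat)) :
    pvFlat (p :: rs) = List.replicate p.2 p.1 ++ pvFlat rs := rfl

theorem pvFlat_append (l r : List (Int × Nat)) : pvFlat (l ++ r) = pvFlat l ++ pvFlat r := by
  simp [pvFlat]

theorem pvFlat_ncons (p : Int × Nat) (rs : List (Int × Nat)) :
    pvFlat (pvNcons p rs) = List.replicate p.2 p.1 ++ pvFlat rs := by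
  unfold pvNcons; split_ifs with h
  · simp [h]
  · exact pvFlat_cons p rs

theorem pvFlat_nsnoc (rs : List (Int × Nat)) (p : Int × Nat) :
    pvFlat (pvNsnoc rs p) = pvFlat rs ++ List.replicate p.2 p.1 := by
  unfold pvNsnoc; split_ifs with h
  · simp [h]
  · simp [pvFlat_append, pvFlat_cons, pvFlat_nil]

theorem pvCnt_nil (z : Int) : pvCnt [] z = 0 := rfl

theorem pvCnt_cons (p : Int × Nat) (rs : List (Int × Nat)) (z : Int) :
    pvCnt (p :: rs) z = if p.1 = z then p.2 else pvCnt rs z := by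
  unfold pvCnt
  rcases h : (p.1 == z) with _ | _
  · simp only [List.find?_cons, h]
    simp only [show ¬ p.1 = z by simpa using h, if_false]
  · simp only [List.find?_cons, h]
    simp only [show p.1 = z by simpa using h, if_true]

theorem pvCnt_eq_zero_of_forall (rs : List (Int × Nat)) (z : Int) (h : ∀ p ∈ rs, p.1 ≠ z) :
    pvCnt rs z = 0 := by
  induction rs with
  | nil => rfl
  | cons q t ih =>
    rw [pvCnt_cons, if_neg (h q (List.mem_cons_self))]
    exact ih fun p hp => h p (List.mem_cons_of_mem _ hp)

theorem pvCnt_append_right (l r : List (Int × Nat)) (z : Int) (h : ∀ p ∈ l, p.1 ≠ z) :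
    pvCnt (l ++ r) z = pvCnt r z := by
  induction l with
  | nil => rfl
  | cons q t ih =>
    rw [List.cons_append, pvCnt_cons, if_neg (h q (List.mem_cons_self))]
    exact ih fun p hp => h p (List.mem_cons_of_mem _ hp)

theorem pvCnt_append_left (l r : List (Int × Nat)) (z : Int) (h : ∀ p ∈ r, p.1 ≠ z) :
    pvCnt (l ++ r) z = pvCnt l z := by
  induction l with
  | nil => exact pvCnt_eq_zero_of_forall r z h
  | cons q t ih =>
    rw [List.cons_append, pvCnt_cons, pvCnt_cons]
    split_ifs <;> [rfl; exact ih]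

theorem pvCnt_ncons_of_ne (p : Int × Nat) (rs : List (Int × Nat)) (z : Int) (h : p.1 ≠ z) :
    pvCnt (pvNcons p rs) z = pvCnt rs z := by
  unfold pvNcons; split_ifs with h0
  · rfl
  · rw [pvCnt_cons, if_neg h]

theorem pvCnt_nsnoc_of_ne (rs : List (Int × Nat)) (p : Int × Nat) (z : Int) (h : p.1 ≠ z) :
    pvCnt (pvNsnoc rs p) z = pvCnt rs z := by
  unfold pvNsnoc; split_ifs with h0
  · rfl
  · exact pvCnt_append_left rs [p] z (by simpa using h)

theorem pvCnt_nsnoc_self (rs : List (Int × Nat)) (p : Int × Nat) (h : ∀ q ∈ rs, q.1 ≠ p.1) :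
    pvCnt (pvNsnoc rs p) p.1 = p.2 := by
  unfold pvNsnoc; split_ifs with h0
  · rw [pvCnt_eq_zero_of_forall rs p.1 h, h0]
  · rw [pvCnt_append_right rs [p] p.1 h, pvCnt_cons, if_pos rfl]

theorem pvFlatMap_ncons (f : Int × Nat → List (Int × Int)) (p : Int × Nat)
    (rs : List (Int × Nat)) (hf : p.2 = 0 → f p = []) :
    (pvNcons p rs).flatMap f = f p ++ rs.flatMap f := by
  unfold pvNcons; split_ifs with h0
  · simp [hf h0]
  · simp

theorem pvFlatMap_nsnoc (f : Int × Nat → List (Int × Int)) (rs : List (Int × Nat))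
    (p : Int × Nat) (hf : p.2 = 0 → f p = []) :
    (pvNsnoc rs p).flatMap f = rs.flatMap f ++ f p := by
  unfold pvNsnoc; split_ifs with h0
  · simp [hf h0]
  · simp

theorem pvValid_ncons (p : Int × Nat) (rs : List (Int × Nat)) (hv : pvValid rs)
    (hlt : ∀ q ∈ rs, p.1 < q.1) : pvValid (pvNcons p rs) := by
  unfold pvNcons; split_ifs with h0
  · exact hv
  · refine ⟨?_, ?_⟩
    · rw [List.map_cons, List.pairwise_cons]
      refine ⟨?_, hv.1⟩
      intro z hz
      obtain ⟨q, hq, rfl⟩ := List.mem_map.1 hz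
      exact hlt q hq
    · intro q hq
      rcases List.mem_cons.1 hq with rfl | hq'
      · omega
      · exact hv.2 q hq'

theorem pvValid_nsnoc (rs : List (Int × Nat)) (p : Int × Nat) (hv : pvValid rs)
    (hlt : ∀ q ∈ rs, q.1 < p.1) : pvValid (pvNsnoc rs p) := by
  unfold pvNsnoc; split_ifs with h0
  · exact hv
  · refine ⟨?_, ?_⟩
    · rw [List.map_append, List.pairwise_append]
      refine ⟨hv.1, by simp, ?_⟩
      intro z hz w hw
      obtain ⟨q, hq, rfl⟩ := List.mem_map.1 hz
      simp only [List.map_cons, List.map_nil, List.mem_singleton] at hw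
      exact hw ▸ hlt q hq
    · intro q hq
      rcases List.mem_append.1 hq with hq' | hq'
      · exact hv.2 q hq'
      · simp only [List.mem_singleton] at hq'
        subst hq'; omega

-- first element of pvFlat with a positive head count
theorem pvHead_replicate_append (v : Int) (c : Nat) (u : List Int) (hc : 0 < c) :
    (List.replicate c v ++ u)[0]? = some v := by
  rw [List.getElem?_append_left (by simp [hc])]
  simp [hc]

theorem pvLast_append_replicate (u : List Int) (w : Int) (d : Nat) (hd : 0 < d) :
    (u ++ List.replicate d w)[(u ++ List.replicate d w).length - 1]? = some w := by
  rw [← List.getLast?_eq_getElem?, List.getLast?_append]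
  have h1 : (List.replicate d w).getLast? = some w := by
    rw [List.getLast?_eq_getElem?]
    simp [hd]
  simp [h1]

theorem pvDropLast_append_replicate (u : List Int) (w : Int) (d : Nat) (hd : 0 < d) :
    (u ++ List.replicate d w).dropLast = u ++ List.replicate (d - 1) w := by
  obtain ⟨d', rfl⟩ : ∃ d', d = d' + 1 := ⟨d - 1, by omega⟩
  rw [List.replicate_succ', ← List.append_assoc, List.dropLast_concat]
  simp

theorem pvTail_replicate_append (v : Int) (c : Nat) (u : List Int) (hc : 0 < c) :
    (List.replicate c v ++ u).tail = List.replicate (c - 1) v ++ u := by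
  obtain ⟨c', rfl⟩ : ∃ c', c = c' + 1 := ⟨c - 1, by omega⟩
  rw [List.replicate_succ]
  simp

theorem pvMem_ncons (p q : Int × Nat) (rs : List (Int × Nat)) (h : q ∈ pvNcons p rs) :
    q ∈ rs ∨ q = p := by
  unfold pvNcons at h; split_ifs at h
  · exact Or.inl h
  · rcases List.mem_cons.1 h with h' | h' <;> [exact Or.inr h'; exact Or.inl h']

theorem pvMem_nsnoc (rs : List (Int × Nat)) (p q : Int × Nat) (h : q ∈ pvNsnoc rs p) :
    q ∈ rs ∨ q = p := by
  unfold pvNsnoc at h; split_ifs at h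
  · exact Or.inl h
  · rcases List.mem_append.1 h with h' | h' <;> [exact Or.inl h'; exact Or.inr (by simpa using h')]

theorem pvValid_decomp (v : Int) (c : Nat) (mid : List (Int × Nat)) (w : Int) (d : Nat)
    (hv : pvValid ((v, c) :: (mid ++ [(w, d)]))) :
    0 < c ∧ 0 < d ∧ v < w ∧ (∀ p ∈ mid, v < p.1 ∧ p.1 < w) ∧ pvValid mid := by
  obtain ⟨hpw, hcnt⟩ := hv
  rw [List.map_cons, List.pairwise_cons] at hpw
  obtain ⟨h1, h2⟩ := hpw
  rw [List.map_append, List.pairwise_append] at h2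
  obtain ⟨hmid, _, hcross⟩ := h2
  refine ⟨hcnt (v, c) List.mem_cons_self, hcnt (w, d) (by simp), h1 w (by simp), ?_, hmid, ?_⟩
  · intro p hp
    refine ⟨h1 p.1 (by rw [List.map_append]; exact List.mem_append_left _ (List.mem_map_of_mem hp)), ?_⟩
    exact hcross p.1 (List.mem_map_of_mem hp) w (by simp)
  · intro p hp
    exact hcnt p (List.mem_cons_of_mem _ (List.mem_append_left _ hp))

theorem pvFlatMap_congr (l : List (Int × Nat)) (f g : Int × Nat → List (Int × Int))
    (h : ∀ x ∈ l, f x = g x) : l.flatMap f = l.flatMap g := by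
  induction l with
  | nil => rfl
  | cons a t ih =>
    rw [List.flatMap_cons, List.flatMap_cons, h a List.mem_cons_self,
        ih fun x hx => h x (List.mem_cons_of_mem _ hx)]

theorem pvG_eq_pvF_aux (k : Int) : ∀ (n : Nat) (rs : List (Int × Nat)),
    (pvFlat rs).length ≤ n → pvValid rs → pvG k (pvFlat rs) = pvF k rs := by
  intro n
  induction n with
  | zero =>
    intro rs hn hv
    have h0 : pvFlat rs = [] := List.eq_nil_of_length_eq_zero (by omega)
    rw [h0, pvG_short k [] (by simp)]
    rcases rs with _ | ⟨⟨v, c⟩, t⟩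
    · rfl
    · exfalso
      have hc : 0 < c := hv.2 (v, c) List.mem_cons_self
      have : pvFlat ((v, c) :: t) ≠ [] := by
        rw [pvFlat_cons]
        simp only [ne_eq, List.append_eq_nil_iff, not_and]
        intro hrep
        exfalso
        have := congrArg List.length hrep
        simp at this
        omega
      exact this h0
  | succ n ih =>
    intro rs hn hv
    rcases rs with _ | ⟨⟨v, c⟩, rs'⟩
    · rw [pvFlat_nil, pvG_short k [] (by simp)]; rfl
    rcases List.eq_nil_or_concat rs' with rfl | ⟨mid, ⟨w, d⟩, rfl⟩
    · -- a single run [(v, c)]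
      have hc : 0 < c := hv.2 (v, c) List.mem_cons_self
      have hflat : pvFlat [(v, c)] = List.replicate c v := by simp [pvFlat]
      have hcntv : pvCnt [(v, c)] v = c := by rw [pvCnt_cons, if_pos rfl]
      have hcnt0 : ∀ z : Int, v ≠ z → pvCnt [(v, c)] z = 0 := fun z hz =>
        pvCnt_eq_zero_of_forall _ _ (by simpa using hz)
      have hF : pvF k [(v, c)] = pvEmitC k v c (pvCnt [(v, c)] (k - v)) := by
        simp [pvF, pvEmit_eq_pvEmitC]
      by_cases hc1 : c = 1
      · subst hc1
        rw [hflat, pvG_short k _ (by simp), hF]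
        rcases lt_trichotomy (v + v) k with h | h | h
        · rw [pvEmitC_lt k v 1 _ h, hcnt0 (k - v) (by omega)]; simp
        · rw [pvEmitC_eq2 k v 1 _ h]; simp
        · rw [pvEmitC_gt k v 1 _ h]
      · -- c ≥ 2
        have hc2 : 2 ≤ c := by omega
        have hx : (List.replicate c v)[0]? = some v := by
          rw [List.getElem?_replicate]; simp [hc]
        have hy : (List.replicate c v)[(List.replicate c v).length - 1]? = some v := by
          rw [List.getElem?_replicate]
          simp only [List.length_replicate]
          rw [if_pos (by omega)]
        have htl : (List.replicate c v).tail = List.replicate (c - 1) v := by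
          obtain ⟨c', rfl⟩ : ∃ c', c = c' + 1 := ⟨c - 1, by omega⟩
          rw [List.replicate_succ]; simp
        have hdl : (List.replicate c v).dropLast = List.replicate (c - 1) v := by
          have := pvDropLast_append_replicate [] v c hc
          rw [List.nil_append] at this
          exact this
        have htdl : (List.replicate c v).tail.dropLast = List.replicate (c - 2) v := by
          rw [htl]
          have := pvDropLast_append_replicate [] v (c - 1) (by omega)
          rw [List.nil_append, show c - 1 - 1 = c - 2 by omega] at this
          exact this
        have hvempty : pvValid ([] : List (Int × Nat)) := ⟨List.Pairwise.nil, by simp⟩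
        have hflat' : ∀ m : Nat, List.replicate m v = pvFlat (pvNcons (v, m) []) := by
          intro m; rw [pvFlat_ncons]; simp [pvFlat]
        have hIH : ∀ m : Nat, m ≤ n → pvG k (List.replicate m v) = pvEmitC k v m (pvCnt (pvNcons (v, m) []) (k - v)) := by
          intro m hm
          rw [hflat' m, ih _ (by rw [← hflat' m]; simp [hm]) (pvValid_ncons _ _ hvempty (by simp))]
          rw [pvF]
          rw [pvFlatMap_ncons _ _ _ (fun h0 => by rw [pvEmit_eq_pvEmitC, h0]; exact pvEmitC_zero _ _ _)]
          simp [pvEmit_eq_pvEmitC]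
        have hnn : c ≤ n + 1 := by
          have := hn; rw [hflat] at this; simpa using this
        rw [hflat, pvG_step k _ v v hx hy (by simpa using hc2), htdl, hdl, htl, hF]
        split_ifs with h1 h2
        · -- v + v = k
          rw [hIH (c - 2) (by omega), pvEmitC_eq2 k v (c - 2) _ h1, pvEmitC_eq2 k v c _ h1,
              show c / 2 = (c - 2) / 2 + 1 by omega, List.replicate_succ]
        · -- v + v > k
          rw [hIH (c - 1) (by omega), pvEmitC_gt k v (c - 1) _ (by omega),
              pvEmitC_gt k v c _ (by omega)]
        · -- v + v < k
          have h3 : v + v < k := by omega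
          rw [hIH (c - 1) (by omega), pvEmitC_lt k v (c - 1) _ h3, pvEmitC_lt k v c _ h3,
              pvCnt_ncons_of_ne (v, c - 1) [] (k - v) (show v ≠ k - v by omega), pvCnt_nil,
              hcnt0 (k - v) (by omega)]
          simp
    · -- rs = (v, c) :: mid ++ [(w, d)]
      simp only [List.concat_eq_append] at hn hv ⊢
      obtain ⟨hc, hd, hvw, hmids, hvmid⟩ := pvValid_decomp v c mid w d hv
      have hmidsne : ∀ p ∈ mid, p.1 ≠ w := fun p hp => ne_of_lt (hmids p hp).2
      have hflat : pvFlat ((v, c) :: (mid ++ [(w, d)])) =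
          (List.replicate c v ++ pvFlat mid) ++ List.replicate d w := by
        simp [pvFlat, List.flatMap_append, List.append_assoc]
      have hn' : c + (pvFlat mid).length + d ≤ n + 1 := by
        have := hn; rw [hflat] at this; simp at this; omega
      have hx : ((List.replicate c v ++ pvFlat mid) ++ List.replicate d w)[0]? = some v := by
        rw [List.append_assoc]; exact pvHead_replicate_append v c _ hc
      have hy := pvLast_append_replicate (List.replicate c v ++ pvFlat mid) w d hd
      have h2 : 2 ≤ ((List.replicate c v ++ pvFlat mid) ++ List.replicate d w).length := by
        simp; omega
      have hTL : ((List.replicate c v ++ pvFlat mid) ++ List.replicate d w).tail =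
          pvFlat (pvNcons (v, c - 1) (mid ++ [(w, d)])) := by
        rw [List.append_assoc, pvTail_replicate_append v c _ hc, pvFlat_ncons, pvFlat_append]
        simp [pvFlat]
      have hDL : ((List.replicate c v ++ pvFlat mid) ++ List.replicate d w).dropLast =
          pvFlat ((v, c) :: pvNsnoc mid (w, d - 1)) := by
        rw [pvDropLast_append_replicate _ w d hd, pvFlat_cons, pvFlat_nsnoc]
        simp [List.append_assoc]
      have hTDL : ((List.replicate c v ++ pvFlat mid) ++ List.replicate d w).tail.dropLast =
          pvFlat (pvNcons (v, c - 1) (pvNsnoc mid (w, d - 1))) := by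
        rw [List.append_assoc, pvTail_replicate_append v c _ hc, ← List.append_assoc,
            pvDropLast_append_replicate _ w d hd, pvFlat_ncons, pvFlat_nsnoc]
        simp [List.append_assoc]
      -- validity of the three reduced run lists
      have hvns : pvValid (pvNsnoc mid (w, d - 1)) :=
        pvValid_nsnoc mid _ hvmid (fun q hq => (hmids q hq).2)
      have hgtns : ∀ q ∈ pvNsnoc mid (w, d - 1), v < q.1 := by
        intro q hq
        rcases pvMem_nsnoc _ _ _ hq with h | h
        · exact (hmids q h).1
        · rw [h]; exact hvw
      have hvmwd : pvValid (mid ++ [(w, d)]) := by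
        have : mid ++ [(w, d)] = pvNsnoc mid (w, d) := by
          unfold pvNsnoc; rw [if_neg (by omega)]
        rw [this]
        exact pvValid_nsnoc mid _ hvmid (fun q hq => (hmids q hq).2)
      have hgtmwd : ∀ q ∈ mid ++ [(w, d)], v < q.1 := by
        intro q hq
        rcases List.mem_append.1 hq with h | h
        · exact (hmids q h).1
        · simp only [List.mem_singleton] at h; rw [h]; exact hvw
      have hval1 : pvValid (pvNcons (v, c - 1) (pvNsnoc mid (w, d - 1))) :=
        pvValid_ncons _ _ hvns hgtns
      have hval2 : pvValid ((v, c) :: pvNsnoc mid (w, d - 1)) := by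
        have e : (v, c) :: pvNsnoc mid (w, d - 1) = pvNcons (v, c) (pvNsnoc mid (w, d - 1)) := by
          unfold pvNcons; rw [if_neg (by omega)]
        rw [e]; exact pvValid_ncons _ _ hvns hgtns
      have hval3 : pvValid (pvNcons (v, c - 1) (mid ++ [(w, d)])) :=
        pvValid_ncons _ _ hvmwd hgtmwd
      -- counts in the original list
      have hcntw : pvCnt ((v, c) :: (mid ++ [(w, d)])) w = d := by
        rw [pvCnt_cons, if_neg (by omega), pvCnt_append_right _ _ _ hmidsne, pvCnt_cons, if_pos rfl]
      -- expansion of pvF on the original list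
      have hFexp : pvF k ((v, c) :: (mid ++ [(w, d)])) =
          pvEmitC k v c (pvCnt ((v, c) :: (mid ++ [(w, d)])) (k - v)) ++
            (mid.flatMap (pvEmit ((v, c) :: (mid ++ [(w, d)])) k) ++
              pvEmitC k w d (pvCnt ((v, c) :: (mid ++ [(w, d)])) (k - w))) := by
        simp [pvF, List.flatMap_append, pvEmit_eq_pvEmitC]
      rw [hflat, pvG_step k _ v w hx hy h2, hTDL, hDL, hTL]
      split_ifs with hEq hGt
      · -- v + w = k : emit (v, w) and recurse with both end runs reduced
        have hkv : k - v = w := by omega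
        have hcntw' : pvCnt (pvNcons (v, c - 1) (pvNsnoc mid (w, d - 1))) w = d - 1 := by
          rw [pvCnt_ncons_of_ne (v, c - 1) _ w (show v ≠ w by omega)]
          exact pvCnt_nsnoc_self mid (w, d - 1) hmidsne
        have hmid : mid.flatMap (pvEmit (pvNcons (v, c - 1) (pvNsnoc mid (w, d - 1))) k) =
            mid.flatMap (pvEmit ((v, c) :: (mid ++ [(w, d)])) k) := by
          apply pvFlatMap_congr
          intro p hp
          rw [pvEmit_eq_pvEmitC, pvEmit_eq_pvEmitC]
          congr 1
          have hz1 : v < k - p.1 := by have := (hmids p hp).2; omega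
          have hz2 : k - p.1 < w := by have := (hmids p hp).1; omega
          rw [pvCnt_ncons_of_ne (v, c - 1) _ (k - p.1) (show v ≠ k - p.1 by omega),
              pvCnt_nsnoc_of_ne mid (w, d - 1) (k - p.1) (show w ≠ k - p.1 by omega),
              pvCnt_cons, if_neg (show ¬ (v = k - p.1) by omega),
              pvCnt_append_left _ _ _ (by simp; omega)]
        rw [ih _ (by rw [pvFlat_ncons, pvFlat_nsnoc]; simp; omega) hval1]
        rw [hFexp, pvF,
            pvFlatMap_ncons _ _ _ (fun h0 => by rw [pvEmit_eq_pvEmitC, h0]; exact pvEmitC_zero _ _ _),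
            pvFlatMap_nsnoc _ _ _ (fun h0 => by rw [pvEmit_eq_pvEmitC, h0]; exact pvEmitC_zero _ _ _)]
        simp only [pvEmit_eq_pvEmitC]
        rw [hmid]
        have hww : k < w + w := by omega
        have hvv : v + v < k := by omega
        rw [pvEmitC_gt k w (d - 1) _ hww, pvEmitC_gt k w d _ hww,
            pvEmitC_lt k v (c - 1) _ hvv, pvEmitC_lt k v c _ hvv,
            hkv, hcntw', hcntw,
            show min c d = min (c - 1) (d - 1) + 1 by omega, List.replicate_succ]
        simp
      · -- v + w > k : drop the last element
        have hcnteq : ∀ z : Int, z < w →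
            pvCnt ((v, c) :: pvNsnoc mid (w, d - 1)) z = pvCnt ((v, c) :: (mid ++ [(w, d)])) z := by
          intro z hz
          rw [pvCnt_cons, pvCnt_cons]
          split_ifs with h
          · rfl
          · rw [pvCnt_nsnoc_of_ne mid (w, d - 1) z (show w ≠ z by omega),
                pvCnt_append_left _ _ _ (by simp; omega)]
        have hmid : mid.flatMap (pvEmit ((v, c) :: pvNsnoc mid (w, d - 1)) k) =
            mid.flatMap (pvEmit ((v, c) :: (mid ++ [(w, d)])) k) := by
          apply pvFlatMap_congr
          intro p hp
          rw [pvEmit_eq_pvEmitC, pvEmit_eq_pvEmitC]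
          congr 1
          exact hcnteq (k - p.1) (by have := (hmids p hp).1; omega)
        rw [ih _ (by rw [pvFlat_cons, pvFlat_nsnoc]; simp; omega) hval2]
        rw [hFexp, pvF, List.flatMap_cons,
            pvFlatMap_nsnoc _ _ _ (fun h0 => by rw [pvEmit_eq_pvEmitC, h0]; exact pvEmitC_zero _ _ _)]
        simp only [pvEmit_eq_pvEmitC]
        have hww : k < w + w := by omega
        rw [hmid, pvEmitC_gt k w (d - 1) _ hww, pvEmitC_gt k w d _ hww,
            hcnteq (k - v) (by omega)]
      · -- v + w < k : drop the first element
        have hLt : v + w < k := by omega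
        have hcnteq : ∀ z : Int, v < z →
            pvCnt (pvNcons (v, c - 1) (mid ++ [(w, d)])) z = pvCnt ((v, c) :: (mid ++ [(w, d)])) z := by
          intro z hz
          rw [pvCnt_ncons_of_ne (v, c - 1) _ z (show v ≠ z by omega),
              pvCnt_cons, if_neg (show ¬ (v = z) by omega)]
        have hmid : mid.flatMap (pvEmit (pvNcons (v, c - 1) (mid ++ [(w, d)])) k) =
            mid.flatMap (pvEmit ((v, c) :: (mid ++ [(w, d)])) k) := by
          apply pvFlatMap_congr
          intro p hp
          rw [pvEmit_eq_pvEmitC, pvEmit_eq_pvEmitC]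
          congr 1
          exact hcnteq (k - p.1) (by have := (hmids p hp).2; omega)
        have hEv : ∀ (m : Nat) (R : List (Int × Nat)), (∀ q ∈ R, q.1 ≠ k - v) →
            pvEmitC k v m (pvCnt R (k - v)) = [] := by
          intro m R hR
          rw [pvCnt_eq_zero_of_forall _ _ hR, pvEmitC_lt k v m 0 (by omega)]
          simp
        rw [ih _ (by
          rw [pvFlat_ncons, pvFlat_append,
              show pvFlat [(w, d)] = List.replicate d w from by simp [pvFlat]]
          simp; omega) hval3]
        rw [hFexp, pvF,
            pvFlatMap_ncons _ _ _ (fun h0 => by rw [pvEmit_eq_pvEmitC, h0]; exact pvEmitC_zero _ _ _),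
            List.flatMap_append]
        simp only [pvEmit_eq_pvEmitC, List.flatMap_cons, List.flatMap_nil]
        rw [hmid]
        rw [hEv (c - 1) (pvNcons (v, c - 1) (mid ++ [(w, d)])) (by
          intro q hq
          rcases pvMem_ncons _ _ _ hq with h | h
          · rcases List.mem_append.1 h with h' | h'
            · have := (hmids q h').2; omega
            · simp only [List.mem_singleton] at h'; rw [h']; simp; omega
          · rw [h]; simp; omega)]
        rw [hEv c ((v, c) :: (mid ++ [(w, d)])) (by
          intro q hq
          rcases List.mem_cons.1 hq with h | h
          · rw [h]; simp; omega
          · rcases List.mem_append.1 h with h' | h'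
            · have := (hmids q h').2; omega
            · simp only [List.mem_singleton] at h'; rw [h']; simp; omega)]
        rw [hcnteq (k - w) (by omega)]
        simp

theorem pvG_eq_pvF (k : Int) (rs : List (Int × Nat)) (h : pvValid rs) :
    pvG k (pvFlat rs) = pvF k rs :=
  pvG_eq_pvF_aux k (pvFlat rs).length rs le_rfl h

theorem pvSlice_dropLast (a : List Int) (lN rN : Nat) (hlr : lN ≤ rN) (hr : rN < a.length) :
    ((a.take (rN + 1)).drop lN).dropLast = (a.take rN).drop lN := by
  rw [List.dropLast_eq_take, List.length_drop, List.length_take, List.take_drop, List.take_take]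
  have e : min (lN + (min (rN + 1) a.length - lN - 1)) (rN + 1) = rN := by omega
  rw [e]

theorem pvG_slice_step (a : List Int) (k : Int) (lN rN : Nat) (h1 : lN < rN) (h2 : rN < a.length) :
    pvG k ((a.take (rN + 1)).drop lN) =
      if a[lN] + a[rN] = k then (a[lN], a[rN]) :: pvG k ((a.take rN).drop (lN + 1))
      else if a[lN] + a[rN] > k then pvG k ((a.take rN).drop lN)
      else pvG k ((a.take (rN + 1)).drop (lN + 1)) := by
  have hlen : ((a.take (rN + 1)).drop lN).length = rN + 1 - lN := by
    simp [List.length_drop, List.length_take]; omega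
  have hx : ((a.take (rN + 1)).drop lN)[0]? = some a[lN] := by
    rw [List.getElem?_drop, List.getElem?_take_of_lt (by omega)]
    exact List.getElem?_eq_getElem (by omega)
  have hy : ((a.take (rN + 1)).drop lN)[((a.take (rN + 1)).drop lN).length - 1]? = some a[rN] := by
    rw [hlen, List.getElem?_drop, List.getElem?_take_of_lt (by omega)]
    have : lN + (rN + 1 - lN - 1) = rN := by omega
    rw [this]
    exact List.getElem?_eq_getElem (by omega)
  rw [pvG_step k _ a[lN] a[rN] hx hy (by omega)]
  rw [List.tail_drop, pvSlice_dropLast a (lN + 1) rN (by omega) h2,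
      pvSlice_dropLast a lN rN (by omega) h2]

theorem pvALoop_eq_pvG (n : Nat) : ∀ (a : List Int) (k : Int) (acc : List (Int × Int)) (l r : Int),
    (r - l).toNat ≤ n → 0 ≤ l → r < (a.length : Int) →
    pvALoop a k l r acc = acc ++ pvG k ((a.take (r + 1).toNat).drop l.toNat) := by
  induction n with
  | zero =>
    intro a k acc l r hn hl hr
    have hnl : ¬ l < r := by omega
    rw [pvALoop, if_neg hnl, pvG_short k _ (by simp [List.length_drop, List.length_take]; omega)]
    simp
  | succ n ih =>
    intro a k acc l r hn hl hr
    by_cases hlt : l < r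
    · have hlr : l.toNat < r.toNat := by omega
      have hrN : r.toNat < a.length := by omega
      have hxe : PySem.List.pyGetD a l 0 = a[l.toNat] :=
        PySem.List.pyGetD_eq_getElem a 0 hl (by omega)
      have hye : PySem.List.pyGetD a r 0 = a[r.toNat] :=
        PySem.List.pyGetD_eq_getElem a 0 (by omega) hr
    
      have hslice : (r + 1).toNat = r.toNat + 1 := by omega
      rw [pvALoop, if_pos hlt]
      simp only [hxe, hye]
      rw [hslice, pvG_slice_step a k l.toNat r.toNat hlr hrN]
      split_ifs with hEq hGt
      · rw [ih a k (acc ++ [(a[l.toNat], a[r.toNat])]) (l + 1) (r - 1) (by omega) (by omega) (by omega)]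
        have e1 : (r - 1 + 1).toNat = r.toNat := by omega
        have e2 : (l + 1).toNat = l.toNat + 1 := by omega
        rw [e1, e2, List.append_assoc]
        rfl
      · rw [ih a k acc l (r - 1) (by omega) hl (by omega)]
        have e1 : (r - 1 + 1).toNat = r.toNat := by omega
        rw [e1]
      · rw [ih a k acc (l + 1) r (by omega) (by omega) hr]
        have e2 : (l + 1).toNat = l.toNat + 1 := by omega
        rw [e2, hslice]
    · rw [pvALoop, if_neg hlt, pvG_short k _ (by simp [List.length_drop, List.length_take]; omega)]
      simp

-- ===== VERDICT (by name: the statement is the Claim_ definition above) =====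
theorem targetsum_sort_spec : Claim_equal_targetsum_sort := by
  intro arr k _
  simp only [Spec_targetsum_sort, targetsum_sort, targetsum_sort_alt]
  generalize hA : PySem.List.sorted arr (fun x => x) false = a
  have hsorted : a.Pairwise (· ≤ ·) := by
    rw [← hA]
    simpa using PySem.List.sorted_pairwise (xs := arr) (key := fun x => x)
  have h1 : pvALoop a k 0 ((a.length : Int) - 1) [] =
      pvG k ((a.take (((a.length : Int) - 1) + 1).toNat).drop (0 : Int).toNat) := by
    have := pvALoop_eq_pvG (((a.length : Int) - 1) - 0).toNat a k [] 0 ((a.length : Int) - 1)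
      le_rfl (by omega) (by omega)
    simpa using this
  have h2 : (a.take (((a.length : Int) - 1) + 1).toNat).drop (0 : Int).toNat = a := by
    have : (((a.length : Int) - 1) + 1).toNat = a.length := by omega
    rw [this]
    simp
  rw [h1, h2]
  have h3 : pvG k a = pvF k (pvRuns a) := by
    conv_lhs => rw [← pvFlat_pvRuns a]
    exact pvG_eq_pvF k (pvRuns a) (pvValid_pvRuns a hsorted)
  rw [h3, PySem.List.foldl_append_eq_flatMap]
  rfl
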